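-- pv_equiv track=rewrite | github.com/she11fish/Coding-Problems | CCC_past_competitions/2022/Good_Fours_and_Good_Fives.py | find_4s_and_5s
-- ===== SOURCE A (Python) =====
-- def find_4s_and_5s(N):
-- 	counter = 0
-- 	x = 0
-- 	while (N-4*x)/5 >= 0:
-- 		if (N-4*x) % 5 == 0:
-- 			counter+=1
-- 		x += 1
-- 	return counter
-- ===== SOURCE B (Python) =====
-- def find_4s_and_5s(N):
--     # O(1): solve 4x = N (mod 5)  ->  x = -N (mod 5); count arithmetic-progression
--     # terms x, x+5, x+10, ... within [0, N//4].
--     if N < 0: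
--         return 0
--     M = N // 4
--     r = (-N) % 5
--     return 0 if r > M else (M - r) // 5 + 1
-- ===== Notes on version B (the rewrite author's own statement) =====
-- stated objective: faster
-- what changed: Replaced the O(N) trial loop over x with an O(1) closed form: solve the congruence 4x = N (mod 5) and count the arithmetic-progression terms in [0, N//4].
import Mathlib
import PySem

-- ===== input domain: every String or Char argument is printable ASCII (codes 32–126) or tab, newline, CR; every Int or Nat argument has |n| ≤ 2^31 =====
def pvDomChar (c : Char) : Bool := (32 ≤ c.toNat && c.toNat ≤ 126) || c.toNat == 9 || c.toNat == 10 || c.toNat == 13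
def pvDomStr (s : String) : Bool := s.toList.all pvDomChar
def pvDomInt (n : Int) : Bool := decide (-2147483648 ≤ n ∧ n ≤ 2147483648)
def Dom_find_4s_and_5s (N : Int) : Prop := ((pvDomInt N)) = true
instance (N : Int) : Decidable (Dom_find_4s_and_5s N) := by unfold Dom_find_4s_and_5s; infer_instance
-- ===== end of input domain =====

-- B replaces A's trial loop over x with a closed form (solve 4x ≡ N mod 5, count AP terms in [0, N//4]); equivalence proved for all N.

-- ===== PORT A =====
-- A's while-loop: the condition (N-4x)/5 >= 0 (Python float division by 5) holds iff N-4x ≥ 0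
def pyLoop (N x counter : Int) : Int :=
  if _h : N - 4*x ≥ 0 then
    pyLoop N (x+1) (if PySem.Int.mod (N - 4*x) 5 = 0 then counter + 1 else counter)
  else counter
termination_by (N - 4*x + 4).toNat
decreasing_by omega

def find_4s_and_5s (N : Int) : Int := pyLoop N 0 0

-- ===== PORT B =====
def find_4s_and_5s_alt (N : Int) : Int :=
  if N < 0 then 0
  else
    let M := PySem.Int.floordiv N 4
    let r := PySem.Int.mod (-N) 5
    if r > M then 0 else PySem.Int.floordiv (M - r) 5 + 1

-- ===== PRECONDITION & SPEC =====
def Spec_find_4s_and_5s (N : Int) (out : Int) : Prop := out = find_4s_and_5s_alt N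
instance (N : Int) (out : Int) : Decidable (Spec_find_4s_and_5s N out) := by unfold Spec_find_4s_and_5s; infer_instance

-- ===== CLAIM (what is proved, stated in full; the proofs are below) =====
def Claim_equal_find_4s_and_5s : Prop := ∀ (N : Int), Dom_find_4s_and_5s N → Spec_find_4s_and_5s N (find_4s_and_5s N)

-- ===== LEMMAS AND PROOFS =====

theorem pymod5 (a : Int) : PySem.Int.mod a 5 = a % 5 :=
  PySem.Int.mod_eq_emod_of_pos (by omega)

theorem pyfd (a b : Int) (hb : 0 < b) : PySem.Int.floordiv a b = a / b :=
  PySem.Int.floordiv_eq_ediv_of_pos hb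

-- closed-form count of the remaining loop iterations of A from position x
def cnt (N x : Int) : Int :=
  if N - 4*x < 0 then 0
  else if x + (-N - x) % 5 > N / 4 then 0
  else (N / 4 - (x + (-N - x) % 5)) / 5 + 1

theorem cnt_step (N x : Int) (h : N - 4*x ≥ 0) :
    cnt N x = (if (N - 4*x) % 5 = 0 then (1:Int) else 0) + cnt N (x+1) := by
  unfold cnt
  split_ifs <;> omega

theorem pyLoop_eq (N : Int) : ∀ (k : Nat) (x c : Int), (N - 4*x + 4).toNat ≤ k →
    pyLoop N x c = c + cnt N x := by
  intro k
  induction k with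
  | zero =>
    intro x c hk
    rw [pyLoop.eq_def]
    split_ifs with h hm
    · exact absurd h (by omega)
    · exact absurd h (by omega)
    · have h0 : cnt N x = 0 := by unfold cnt; rw [if_pos (by omega)]
      omega
  | succ k ih =>
    intro x c hk
    rw [pyLoop.eq_def]
    split_ifs with h hm
    · rw [ih (x+1) (c+1) (by omega), cnt_step N x h]
      rw [pymod5] at hm
      rw [if_pos hm]; ring
    · rw [ih (x+1) c (by omega), cnt_step N x h]
      rw [pymod5] at hm
      rw [if_neg hm]; ring
    · have h0 : cnt N x = 0 := by unfold cnt; rw [if_pos (by omega)]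
      omega

-- ===== VERDICT (by name: the statement is the Claim_ definition above) =====
theorem find_4s_and_5s_spec : Claim_equal_find_4s_and_5s := by
  intro N _
  unfold Spec_find_4s_and_5s find_4s_and_5s find_4s_and_5s_alt
  rw [pyLoop_eq N (N + 4).toNat 0 0 (by omega)]
  unfold cnt
  simp only [pyfd _ 4 (by omega), pyfd _ 5 (by omega), pymod5]
  split_ifs <;> omega
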